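-- pv_equiv track=rewrite | github.com/anothel/CodeKata | 백준/Bronze/2930. 가위 바위 보/가위 바위 보.py | getExpectScore
-- ===== SOURCE A (Python) =====
-- def getMyScore(mine: str, yours: str) -> int:
--     score: int = 0
--     if mine == 'R' and yours == 'S':
--         score = 2
--     elif mine == 'R' and yours == 'R':
--         score = 1
--     elif mine == 'S' and yours == 'P':
--         score = 2
--     elif mine == 'S' and yours == 'S':
--         score = 1
--     elif mine == 'P' and yours == 'R':
--         score = 2
--     elif mine == 'P' and yours == 'P':
--         score = 1
--     return score
--
-- def getExpectScore(r: int, frds: list) -> int: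
--     answer: int = 0
--
--     for i in range(r):
--         nums: list = [0 for _ in range(3)]
--         for frd in frds:
--             nums[0] += getMyScore('R', frd[i])
--             nums[1] += getMyScore('S', frd[i])
--             nums[2] += getMyScore('P', frd[i])
--         answer += max(nums)
--
--     return answer
-- ===== SOURCE B (Python) =====
-- def getExpectScore(r: int, frds: list) -> int:
--     # One friend-major pass builds a per-round tally table, then a closing
--     # arithmetic pass turns each tally into the best score for that round.
--     counts = [(0, 0, 0)] * r
--     for frd in frds:
--         for i in range(r):
--             cR, cS, cP = counts[i]
--             c = frd[i]
--             if c == 'R':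
--                 counts[i] = (cR + 1, cS, cP)
--             elif c == 'S':
--                 counts[i] = (cR, cS + 1, cP)
--             elif c == 'P':
--                 counts[i] = (cR, cS, cP + 1)
--     total = 0
--     for cR, cS, cP in counts:
--         total += max(2 * cS + cR, 2 * cP + cS, 2 * cR + cP)
--     return total
-- ===== Notes on version B (the rewrite author's own statement) =====
-- stated objective: alternative
-- what changed: B inverts the loop nesting: a single friend-major pass builds a per-round tally table counting 'R'/'S'/'P', then a closing pass converts each tally arithmetically (max of 2*cS+cR, 2*cP+cS, 2*cR+cP), replacing A's round-major rescans that call getMyScore three times per cell.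
import Mathlib
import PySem

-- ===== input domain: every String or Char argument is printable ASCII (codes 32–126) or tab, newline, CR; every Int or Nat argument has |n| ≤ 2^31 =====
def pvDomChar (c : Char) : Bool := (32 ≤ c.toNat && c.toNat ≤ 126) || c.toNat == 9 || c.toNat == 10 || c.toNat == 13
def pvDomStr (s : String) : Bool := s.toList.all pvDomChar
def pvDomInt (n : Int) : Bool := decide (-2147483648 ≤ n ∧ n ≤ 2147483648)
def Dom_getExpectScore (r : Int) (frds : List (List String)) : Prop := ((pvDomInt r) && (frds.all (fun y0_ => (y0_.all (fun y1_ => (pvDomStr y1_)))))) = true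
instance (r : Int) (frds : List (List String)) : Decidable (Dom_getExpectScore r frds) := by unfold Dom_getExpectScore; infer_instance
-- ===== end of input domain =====

-- B inverts the loop nesting: one friend-major pass builds a per-round tally table, then a
-- closing pass turns each tally into that round's best score arithmetically (alternative
-- decomposition; return values proved equal).

-- ===== PORT A =====
def getMyScore (mine yours : String) : Int :=
  if mine = "R" ∧ yours = "S" then 2
  else if mine = "R" ∧ yours = "R" then 1
  else if mine = "S" ∧ yours = "P" then 2
  else if mine = "S" ∧ yours = "S" then 1
  else if mine = "P" ∧ yours = "R" then 2
  else if mine = "P" ∧ yours = "P" then 1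
  else 0

-- the body of A's inner 'for frd in frds' loop (nums[0..2] kept as a triple)
def pvStepA (i : Int) (n : Int × Int × Int) (frd : List String) : Int × Int × Int :=
  (n.1 + getMyScore "R" (PySem.List.pyGetD frd i ""),
   n.2.1 + getMyScore "S" (PySem.List.pyGetD frd i ""),
   n.2.2 + getMyScore "P" (PySem.List.pyGetD frd i ""))

def getExpectScore (r : Int) (frds : List (List String)) : Int :=
  (PySem.List.pyRange 0 r 1).foldl (fun answer i =>
    let nums := frds.foldl (pvStepA i) (0, 0, 0)
    answer + max nums.1 (max nums.2.1 nums.2.2)) 0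

-- ===== PORT B =====
-- the body of B's 'counts[i] = …' update for one cell (cR, cS, cP as a triple)
def pvUpd (i : Int) (frd : List String) (c : Int × Int × Int) : Int × Int × Int :=
  let s := PySem.List.pyGetD frd i ""
  if s = "R" then (c.1 + 1, c.2.1, c.2.2)
  else if s = "S" then (c.1, c.2.1 + 1, c.2.2)
  else if s = "P" then (c.1, c.2.1, c.2.2 + 1)
  else c

-- the friend-major double loop that builds the per-round tally table
def pvTally (r : Int) (frds : List (List String)) : List (Int × Int × Int) :=
  frds.foldl (fun t frd =>
    (PySem.List.pyRange 0 r 1).foldl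
      (fun t i => t.set i.toNat (pvUpd i frd (t.getD i.toNat (0, 0, 0)))) t)
    (List.replicate r.toNat (0, 0, 0))

def getExpectScore_alt (r : Int) (frds : List (List String)) : Int :=
  (pvTally r frds).foldl (fun total c =>
    total + max (2 * c.2.1 + c.1) (max (2 * c.2.2 + c.2.1) (2 * c.1 + c.2.2))) 0

-- ===== PRECONDITION & SPEC =====
-- Pre_ excludes exactly the inputs where A raises IndexError: some friend's list is shorter than the round count r.
def Pre_getExpectScore (r : Int) (frds : List (List String)) : Prop :=
  0 < r → ∀ frd ∈ frds, r ≤ (frd.length : Int)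
instance (r : Int) (frds : List (List String)) : Decidable (Pre_getExpectScore r frds) := by
  unfold Pre_getExpectScore; infer_instance
def pvWitness_getExpectScore : Int × List (List String) := (2, [["R", "S"], ["P", "P"]])

def Spec_getExpectScore (r : Int) (frds : List (List String)) (out : Int) : Prop := out = getExpectScore_alt r frds
instance (r : Int) (frds : List (List String)) (out : Int) : Decidable (Spec_getExpectScore r frds out) := by unfold Spec_getExpectScore; infer_instance

-- ===== CLAIM (what is proved, stated in full; the proofs are below) =====
def Claim_equal_getExpectScore : Prop := ∀ (r : Int) (frds : List (List String)), Dom_getExpectScore r frds → Pre_getExpectScore r frds → Spec_getExpectScore r frds (getExpectScore r frds)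

-- ===== LEMMAS AND PROOFS =====

-- setting index a of a table that is a map over range 0..r rewrites the mapped function at a
theorem pv_map_set {α : Type} (r a : Int) (ha : 0 ≤ a) (_har : a < r) (h : Int → α) (v : α) :
    ((PySem.List.pyRange 0 r 1).map h).set a.toNat v
    = (PySem.List.pyRange 0 r 1).map (fun i => if i = a then v else h i) := by
  apply List.ext_getElem
  · simp
  intro j hj1 hj2
  simp only [List.getElem_set, List.getElem_map, PySem.List.getElem_pyRange_one]
  by_cases hja : j = a.toNat
  · rw [if_pos hja.symm, if_pos (by omega)]
  · rw [if_neg (by omega), if_neg (by omega)]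

-- reading index a of such a table gives the mapped function at a
theorem pv_map_getD {α : Type} [Inhabited α] (r a : Int) (ha : 0 ≤ a) (hr : a < r)
    (h : Int → α) (d : α) :
    ((PySem.List.pyRange 0 r 1).map h).getD a.toNat d = h a := by
  rw [List.getD_eq_getElem _ _ (by simp [PySem.List.length_pyRange_one]; omega)]
  simp only [List.getElem_map, PySem.List.getElem_pyRange_one]
  congr 1
  omega

-- one pass of B's inner 'for i in range(r)' loop over a table given as a map over the range
theorem pv_inner_pass (r : Int) (frd : List String) :
    ∀ (n : Nat) (a : Int), 0 ≤ a → (r - a).toNat = n → ∀ (h : Int → Int × Int × Int),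
    (PySem.List.pyRange a r 1).foldl
      (fun t i => t.set i.toNat (pvUpd i frd (t.getD i.toNat (0, 0, 0))))
      ((PySem.List.pyRange 0 r 1).map h)
    = (PySem.List.pyRange 0 r 1).map (fun i => if a ≤ i then pvUpd i frd (h i) else h i) := by
  intro n
  induction n with
  | zero =>
    intro a ha hn h
    rw [PySem.List.pyRange_one_eq_nil (a := a) (b := r) (by omega), List.foldl_nil]
    apply List.map_congr_left
    intro i hi
    rw [PySem.List.mem_pyRange_one] at hi
    rw [if_neg (by omega)]
  | succ m ih =>
    intro a ha hn h
    have har : a < r := by omega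
    rw [PySem.List.pyRange_one_cons (a := a) (b := r) har, List.foldl_cons]
    rw [pv_map_getD r a ha har h, pv_map_set r a ha har h]
    rw [ih (a + 1) (by omega) (by omega)]
    apply List.map_congr_left
    intro i hi
    rw [PySem.List.mem_pyRange_one] at hi
    by_cases hia : i = a
    · subst hia
      rw [if_neg (by omega), if_pos rfl, if_pos (le_refl _)]
    · rw [if_neg hia]
      by_cases hai : a ≤ i
      · rw [if_pos (by omega), if_pos hai]
      · rw [if_neg (by omega), if_neg hai]

-- the whole friend-major loop yields, per round i, the column fold of pvUpd over frds
theorem pv_tally_eq (r : Int) (frds : List (List String)) :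
    pvTally r frds
    = (PySem.List.pyRange 0 r 1).map (fun i => frds.foldl (fun c frd => pvUpd i frd c) (0, 0, 0)) := by
  unfold pvTally
  have hrep : List.replicate r.toNat ((0, 0, 0) : Int × Int × Int)
      = (PySem.List.pyRange 0 r 1).map (fun _ => (0, 0, 0)) := by
    apply List.ext_getElem
    · simp [PySem.List.length_pyRange_one]
    intro j hj1 hj2
    simp
  rw [hrep]
  suffices H : ∀ (fs : List (List String)) (h : Int → Int × Int × Int),
      fs.foldl (fun t frd =>
        (PySem.List.pyRange 0 r 1).foldl
          (fun t i => t.set i.toNat (pvUpd i frd (t.getD i.toNat (0, 0, 0)))) t)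
        ((PySem.List.pyRange 0 r 1).map h)
      = (PySem.List.pyRange 0 r 1).map
          (fun i => fs.foldl (fun c frd => pvUpd i frd c) (h i)) by
    exact H frds (fun _ => (0, 0, 0))
  intro fs
  induction fs with
  | nil => intro h; simp
  | cons frd rest ih =>
    intro h
    rw [List.foldl_cons,
      pv_inner_pass r frd (r - 0).toNat 0 (le_refl 0) rfl h]
    have heq : (PySem.List.pyRange 0 r 1).map
        (fun i => if 0 ≤ i then pvUpd i frd (h i) else h i)
        = (PySem.List.pyRange 0 r 1).map (fun i => pvUpd i frd (h i)) := by
      apply List.map_congr_left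
      intro i hi
      rw [PySem.List.mem_pyRange_one] at hi
      rw [if_pos hi.1]
    rw [heq, ih]
    simp [List.foldl_cons]

-- A's inner triple is the fixed arithmetic image of B's column counts
theorem inner_invariant (frds : List (List String)) (i : Int) (x y z : Int) :
    frds.foldl (pvStepA i) (2 * y + x, 2 * z + y, 2 * x + z)
    = (fun (c : Int × Int × Int) => (2 * c.2.1 + c.1, 2 * c.2.2 + c.2.1, 2 * c.1 + c.2.2))
      (frds.foldl (fun c frd => pvUpd i frd c) (x, y, z)) := by
  induction frds generalizing x y z with
  | nil => simp
  | cons frd rest ih =>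
    rw [List.foldl_cons, List.foldl_cons]
    by_cases hR : PySem.List.pyGetD frd i "" = "R"
    · have hA : pvStepA i (2 * y + x, 2 * z + y, 2 * x + z) frd
          = (2 * y + (x + 1), 2 * z + y, 2 * (x + 1) + z) := by
        simp [pvStepA, getMyScore, hR, Prod.ext_iff]; omega
      have hB : pvUpd i frd (x, y, z) = (x + 1, y, z) := by simp [pvUpd, hR]
      rw [hA, hB]; exact ih (x + 1) y z
    · by_cases hS : PySem.List.pyGetD frd i "" = "S"
      · have hA : pvStepA i (2 * y + x, 2 * z + y, 2 * x + z) frd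
            = (2 * (y + 1) + x, 2 * z + (y + 1), 2 * x + z) := by
          simp [pvStepA, getMyScore, hS, Prod.ext_iff]; omega
        have hB : pvUpd i frd (x, y, z) = (x, y + 1, z) := by simp [pvUpd, hS]
        rw [hA, hB]; exact ih x (y + 1) z
      · by_cases hP : PySem.List.pyGetD frd i "" = "P"
        · have hA : pvStepA i (2 * y + x, 2 * z + y, 2 * x + z) frd
              = (2 * y + x, 2 * (z + 1) + y, 2 * x + (z + 1)) := by
            simp [pvStepA, getMyScore, hP, Prod.ext_iff]; omega
          have hB : pvUpd i frd (x, y, z) = (x, y, z + 1) := by simp [pvUpd, hP]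
          rw [hA, hB]; exact ih x y (z + 1)
        · have hA : pvStepA i (2 * y + x, 2 * z + y, 2 * x + z) frd
              = (2 * y + x, 2 * z + y, 2 * x + z) := by
            simp [pvStepA, getMyScore, hR, hS, hP]
          have hB : pvUpd i frd (x, y, z) = (x, y, z) := by simp [pvUpd, hR, hS, hP]
          rw [hA, hB]; exact ih x y z

-- ===== VERDICT (by name: the statement is the Claim_ definition above) =====
theorem getExpectScore_spec : Claim_equal_getExpectScore := by
  intro r frds _ _
  unfold Spec_getExpectScore getExpectScore getExpectScore_alt
  rw [pv_tally_eq, List.foldl_map]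
  congr 1
  funext answer i
  have h := inner_invariant frds i 0 0 0
  norm_num at h
  rw [h]
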